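-- pv_equiv track=rewrite | github.com/nolenroyalty/vim-badapple | process_image.py | find_runs_for_this_row
-- ===== SOURCE A (Python) =====
-- def find_runs_for_this_row(row):
--     runs = []
--     start = None
--
--     for i, val in enumerate(row):
--         if val == 1 and start is None:
--             start = i
--         elif val == 0 and start is not None:
--             runs.append((start, i))
--             start = None
--
--     if start is not None:
--         runs.append((start, len(row)))
--     return runs
-- ===== SOURCE B (Python) =====
-- def _first_one(row, lo, hi):
--     """First index j in [lo, hi) with row[j] == 1, else None."""
--     return next((j for j in range(lo, hi) if row[j] == 1), None)
--
-- def find_runs_for_this_row(row):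
--     # Split the row at zeros into segments; each segment contributes the run
--     # from its first 1 (if any) to the closing zero (or end of row).
--     runs = []
--     seg_start = 0
--     for i, val in enumerate(row):
--         if val == 0:
--             j = _first_one(row, seg_start, i)
--             if j is not None:
--                 runs.append((j, i))
--             seg_start = i + 1
--     j = _first_one(row, seg_start, len(row))
--     if j is not None:
--         runs.append((j, len(row)))
--     return runs
-- ===== Notes on version B (the rewrite author's own statement) =====
-- stated objective: alternative
-- what changed: Replaces A's single-pass start/emit state machine with a zero-delimited segmentation: the row is split at zeros and each segment is searched for its first 1, which opens the run closed by the delimiting zero (or end of row).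
import Mathlib
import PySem

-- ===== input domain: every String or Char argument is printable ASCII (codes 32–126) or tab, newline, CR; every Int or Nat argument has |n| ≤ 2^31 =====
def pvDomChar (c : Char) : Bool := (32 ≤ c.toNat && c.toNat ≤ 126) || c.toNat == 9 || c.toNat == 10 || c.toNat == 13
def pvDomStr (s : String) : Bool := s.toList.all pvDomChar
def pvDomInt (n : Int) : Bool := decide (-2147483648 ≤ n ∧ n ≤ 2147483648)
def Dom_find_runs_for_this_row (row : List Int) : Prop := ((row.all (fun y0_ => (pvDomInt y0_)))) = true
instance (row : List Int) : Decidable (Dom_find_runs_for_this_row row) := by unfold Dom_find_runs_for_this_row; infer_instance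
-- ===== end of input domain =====

-- B replaces A's start/emit state machine by zero-delimited segmentation (first-1 search per segment); objective: alternative decomposition, same cost.


-- ===== PORT A =====
-- A's for-loop over enumerate(row) as structural recursion carrying (i, runs, start).
def loopA : List Int → Nat → List (Int × Int) → Option Nat → List (Int × Int)
  | [], i, runs, start =>
      match start with
      | some s => runs ++ [((s : Int), (i : Int))]
      | none => runs
  | v :: rest, i, runs, start =>
      match start with
      | none =>
          if v = 1 then loopA rest (i + 1) runs (some i)
          else loopA rest (i + 1) runs none
      | some s =>
          if v = 0 then loopA rest (i + 1) (runs ++ [((s : Int), (i : Int))]) none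
          else loopA rest (i + 1) runs (some s)

def find_runs_for_this_row (row : List Int) : List (Int × Int) :=
  loopA row 0 [] none

-- ===== PORT B =====
-- Source B's _first_one: first j in [lo, hi) with row[j] == 1 (next over a generator → find?).
def firstOne (row : List Int) (lo hi : Nat) : Option Nat :=
  (List.range' lo (hi - lo)).find? (fun j => row.getD j 0 == 1)

-- Source B's for-loop: split at zeros, search each completed segment.
def loopB (row : List Int) : List Int → Nat → List (Int × Int) → Nat → List (Int × Int)
  | [], i, runs, segStart =>
      match firstOne row segStart i with
      | some j => runs ++ [((j : Int), (i : Int))]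
      | none => runs
  | v :: rest, i, runs, segStart =>
      if v = 0 then
        match firstOne row segStart i with
        | some j => loopB row rest (i + 1) (runs ++ [((j : Int), (i : Int))]) (i + 1)
        | none => loopB row rest (i + 1) runs (i + 1)
      else loopB row rest (i + 1) runs segStart

def find_runs_for_this_row_alt (row : List Int) : List (Int × Int) :=
  loopB row row 0 [] 0

-- ===== PRECONDITION & SPEC =====
def Spec_find_runs_for_this_row (row : List Int) (out : List (Int × Int)) : Prop := out = find_runs_for_this_row_alt row
instance (row : List Int) (out : List (Int × Int)) : Decidable (Spec_find_runs_for_this_row row out) := by unfold Spec_find_runs_for_this_row; infer_instance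

-- ===== CLAIM (what is proved, stated in full; the proofs are below) =====
def Claim_equal_find_runs_for_this_row : Prop := ∀ (row : List Int), Dom_find_runs_for_this_row row → Spec_find_runs_for_this_row row (find_runs_for_this_row row)

-- ===== LEMMAS AND PROOFS =====

theorem firstOne_refl (row : List Int) (lo : Nat) : firstOne row lo lo = none := by
  simp [firstOne]

theorem firstOne_succ (row : List Int) (lo i : Nat) (h : lo ≤ i) :
    firstOne row lo (i + 1) =
      match firstOne row lo i with
      | some j => some j
      | none => if row.getD i 0 = 1 then some i else none := by
  unfold firstOne
  have h1 : i + 1 - lo = (i - lo) + 1 := by omega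
  have h2 : lo + (i - lo) = i := by omega
  rw [h1, List.range'_concat, List.find?_append]
  simp only [one_mul, h2]
  cases hf : List.find? (fun j => row.getD j 0 == 1) (List.range' lo (i - lo)) with
  | some j => simp
  | none =>
      simp only [Option.none_or, List.find?, List.getD_eq_getElem?_getD]
      cases hb : (row[i]?.getD 0 == 1) with
      | true => simp only [beq_iff_eq] at hb; simp [hb]
      | false => simp only [beq_eq_false_iff_ne] at hb; simp [hb]

theorem drop_head_getD (row : List Int) (i : Nat) (v : Int) (rest : List Int)
    (h : row.drop i = v :: rest) : row.getD i 0 = v := by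
  have h0 : row[i]? = some v := by
    have h' : (row.drop i)[0]? = some v := by rw [h]; rfl
    rw [List.getElem?_drop] at h'
    simpa using h'
  simp [List.getD_eq_getElem?_getD, h0]

theorem drop_succ (row : List Int) (i : Nat) (v : Int) (rest : List Int)
    (h : row.drop i = v :: rest) : row.drop (i + 1) = rest := by
  rw [← List.tail_drop, h]
  rfl

theorem loop_eq (row : List Int) :
    ∀ (rest : List Int) (i : Nat) (runs : List (Int × Int)) (segStart : Nat),
      row.drop i = rest → segStart ≤ i →
      loopA rest i runs (firstOne row segStart i) = loopB row rest i runs segStart := by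
  intro rest
  induction rest with
  | nil =>
      intro i runs segStart _ _
      cases h : firstOne row segStart i <;> simp [loopA, loopB, h]
  | cons v rest ih =>
      intro i runs segStart hdrop hle
      have hv : row.getD i 0 = v := drop_head_getD row i v rest hdrop
      have hdrop' : row.drop (i + 1) = rest := drop_succ row i v rest hdrop
      have hstep := firstOne_succ row segStart i hle
      cases h : firstOne row segStart i with
      | none =>
          rw [h] at hstep
          by_cases h1 : v = 1
          · have h0 : ¬ v = 0 := by omega
            have hv' : row[i]?.getD 0 = v := by
              simpa [List.getD_eq_getElem?_getD] using hv
            have hf1 : firstOne row segStart (i + 1) = some i := by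
              rw [hstep]; simp [hv', h1]
            simp only [loopA, loopB, if_pos h1, if_neg h0]
            rw [← hf1]
            exact ih (i + 1) runs segStart hdrop' (by omega)
          · by_cases h0 : v = 0
            · have hf1 : firstOne row (i + 1) (i + 1) = none := firstOne_refl row (i + 1)
              simp only [loopA, loopB, if_neg h1, if_pos h0, h]
              rw [← hf1]
              exact ih (i + 1) runs (i + 1) hdrop' (by omega)
            · have hv' : row[i]?.getD 0 = v := by
                simpa [List.getD_eq_getElem?_getD] using hv
              have hf1 : firstOne row segStart (i + 1) = none := by
                rw [hstep]; simp [hv', h1]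
              simp only [loopA, loopB, if_neg h1, if_neg h0]
              rw [← hf1]
              exact ih (i + 1) runs segStart hdrop' (by omega)
      | some s =>
          rw [h] at hstep
          by_cases h0 : v = 0
          · have hf1 : firstOne row (i + 1) (i + 1) = none := firstOne_refl row (i + 1)
            simp only [loopA, loopB, if_pos h0, h]
            rw [← hf1]
            exact ih (i + 1) (runs ++ [((s : Int), (i : Int))]) (i + 1) hdrop' (by omega)
          · have hf1 : firstOne row segStart (i + 1) = some s := by rw [hstep]
            simp only [loopA, loopB, if_neg h0]
            rw [← hf1]
            exact ih (i + 1) runs segStart hdrop' (by omega)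

-- ===== VERDICT (by name: the statement is the Claim_ definition above) =====
theorem find_runs_for_this_row_spec : Claim_equal_find_runs_for_this_row := by
  intro row _
  unfold Spec_find_runs_for_this_row find_runs_for_this_row find_runs_for_this_row_alt
  rw [← firstOne_refl row 0]
  exact loop_eq row row 0 [] 0 (by simp) (by omega)
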